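-- pv_equiv track=rewrite | github.com/lucaleporini/FixationSaccadesAnalysis | gaze_detector_IDT.py | cleanRawData
-- ===== SOURCE A (Python) =====
-- def cleanRawData(raw_data, height, width):
--     raw_data_sublists = []
--     sublist_temp = []
--     for i in range(0, len(raw_data)):
--         # controllo se le coordinate x e y sono 0 o al di fuori dallo schermo
--         if (raw_data[i][1] == 0 and raw_data[i][2] == 0) or (
--                 raw_data[i][1] < 0 or raw_data[i][1] > width or raw_data[i][2] < 0 or raw_data[i][2] > height):
--             if len(sublist_temp) != 0:
--                 # aggiungo la sotto lista in modo da rimuovere i dati "sporchi"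
--                 raw_data_sublists.append(sublist_temp)
--                 sublist_temp = []
--         else:
--             sublist_temp.append(raw_data[i])
--     if len(sublist_temp) != 0:
--         raw_data_sublists.append(sublist_temp)
--     return raw_data_sublists
-- ===== SOURCE B (Python) =====
-- def cleanRawData(raw_data, height, width):
--     # Two-pointer run extraction: skip dirty points, slice out each maximal
--     # clean run directly, instead of A's accumulate-and-flush temp list.
--     n = len(raw_data)
--     res = []
--     i = 0
--     while i < n:
--         p = raw_data[i]
--         if (p[1] == 0 and p[2] == 0) or p[1] < 0 or p[1] > width or p[2] < 0 or p[2] > height: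
--             i += 1
--         else:
--             j = i + 1
--             while j < n:
--                 q = raw_data[j]
--                 if (q[1] == 0 and q[2] == 0) or q[1] < 0 or q[1] > width or q[2] < 0 or q[2] > height:
--                     break
--                 j += 1
--             res.append(raw_data[i:j])
--             i = j
--     return res
-- ===== Notes on version B (the rewrite author's own statement) =====
-- stated objective: alternative
-- what changed: Replaces A's accumulate-and-flush temp-list state machine with a two-pointer scan that skips dirty points and slices out each maximal clean run directly.
import Mathlib
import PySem

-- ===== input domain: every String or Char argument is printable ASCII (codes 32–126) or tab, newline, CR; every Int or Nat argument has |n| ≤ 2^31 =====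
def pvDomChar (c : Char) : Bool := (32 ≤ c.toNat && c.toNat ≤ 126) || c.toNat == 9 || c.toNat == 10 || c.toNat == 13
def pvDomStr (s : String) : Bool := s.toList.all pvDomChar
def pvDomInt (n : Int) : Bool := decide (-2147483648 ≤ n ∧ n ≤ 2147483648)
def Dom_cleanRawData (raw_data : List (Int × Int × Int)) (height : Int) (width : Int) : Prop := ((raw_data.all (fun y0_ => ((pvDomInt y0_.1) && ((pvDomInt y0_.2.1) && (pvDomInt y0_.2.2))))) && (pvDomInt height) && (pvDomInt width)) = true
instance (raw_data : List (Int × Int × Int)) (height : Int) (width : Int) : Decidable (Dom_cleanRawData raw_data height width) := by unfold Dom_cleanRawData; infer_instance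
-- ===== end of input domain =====

-- B replaces A's accumulate-and-flush temp list with a two-pointer scan that
-- slices out each maximal clean run directly (objective: alternative structure).

-- ===== PORT A =====
-- A's dirty test: (x==0 and y==0) or x<0 or x>width or y<0 or y>height
def pvDirtyA (height width : Int) (p : Int × Int × Int) : Bool :=
  (p.2.1 == 0 && p.2.2 == 0) || decide (p.2.1 < 0) || decide (p.2.1 > width)
    || decide (p.2.2 < 0) || decide (p.2.2 > height)

def cleanRawData (raw_data : List (Int × Int × Int)) (height : Int) (width : Int) : List (List (Int × Int × Int)) :=
  let st := (PySem.List.pyRange 0 (raw_data.length : Int) 1).foldl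
    (fun (s : List (List (Int × Int × Int)) × List (Int × Int × Int)) i =>
      if pvDirtyA height width (PySem.List.pyGetD raw_data i (0, 0, 0)) then
        if s.2.length ≠ 0 then (s.1 ++ [s.2], []) else s
      else (s.1, s.2 ++ [PySem.List.pyGetD raw_data i (0, 0, 0)]))
    ([], [])
  if st.2.length ≠ 0 then st.1 ++ [st.2] else st.1

-- ===== PORT B =====
-- B's clean test: the negation of the dirty condition
def pvCleanB (height width : Int) (p : Int × Int × Int) : Bool :=
  !((p.2.1 == 0 && p.2.2 == 0) || decide (p.2.1 < 0) || decide (p.2.1 > width)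
      || decide (p.2.2 < 0) || decide (p.2.2 > height))

-- the outer while loop of Source B: skip a dirty point, or slice out the maximal
-- clean run starting here (the inner while = takeWhile/dropWhile) and continue
def cleanAltGo (height width : Int) : List (Int × Int × Int) → List (List (Int × Int × Int))
  | [] => []
  | x :: xs =>
    if pvCleanB height width x then
      (x :: xs.takeWhile (pvCleanB height width)) ::
        cleanAltGo height width (xs.dropWhile (pvCleanB height width))
    else
      cleanAltGo height width xs
termination_by l => l.length
decreasing_by
  · have := List.length_dropWhile_le (pvCleanB height width) xs
    simp; omega
  · simp

def cleanRawData_alt (raw_data : List (Int × Int × Int)) (height : Int) (width : Int) : List (List (Int × Int × Int)) :=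
  cleanAltGo height width raw_data

-- ===== PRECONDITION & SPEC =====
def Spec_cleanRawData (raw_data : List (Int × Int × Int)) (height : Int) (width : Int) (out : List (List (Int × Int × Int))) : Prop := out = cleanRawData_alt raw_data height width
instance (raw_data : List (Int × Int × Int)) (height : Int) (width : Int) (out : List (List (Int × Int × Int))) : Decidable (Spec_cleanRawData raw_data height width out) := by unfold Spec_cleanRawData; infer_instance

-- ===== CLAIM (what is proved, stated in full; the proofs are below) =====
def Claim_equal_cleanRawData : Prop := ∀ (raw_data : List (Int × Int × Int)) (height : Int) (width : Int), Dom_cleanRawData raw_data height width → Spec_cleanRawData raw_data height width (cleanRawData raw_data height width)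

-- ===== LEMMAS AND PROOFS =====

theorem pvDirtyA_eq_not_clean (h w : Int) (p : Int × Int × Int) :
    pvDirtyA h w p = !pvCleanB h w p := by
  simp [pvDirtyA, pvCleanB]

-- A's finishing step
def pvFinish (s : List (List (Int × Int × Int)) × List (Int × Int × Int)) : List (List (Int × Int × Int)) :=
  if s.2.length ≠ 0 then s.1 ++ [s.2] else s.1

-- main invariant: A's fold, run over the remaining elements with state (acc, temp),
-- produces acc followed by temp glued onto B's runs of the remainder
theorem pvMain (h w : Int) (xs : List (Int × Int × Int))
    (acc : List (List (Int × Int × Int))) (temp : List (Int × Int × Int)) :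
    pvFinish (xs.foldl
      (fun (s : List (List (Int × Int × Int)) × List (Int × Int × Int)) p =>
        if pvDirtyA h w p then
          if s.2.length ≠ 0 then (s.1 ++ [s.2], []) else s
        else (s.1, s.2 ++ [p])) (acc, temp))
    = acc ++ (if temp = [] then cleanAltGo h w xs
              else (temp ++ xs.takeWhile (pvCleanB h w)) ::
                     cleanAltGo h w (xs.dropWhile (pvCleanB h w))) := by
  induction xs generalizing acc temp with
  | nil =>
    cases temp <;> simp [pvFinish, cleanAltGo]
  | cons x xs ih =>
    rw [List.foldl_cons]
    by_cases hc : pvCleanB h w x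
    · have hd : pvDirtyA h w x = false := by rw [pvDirtyA_eq_not_clean, hc]; rfl
      rw [hd, if_neg (by simp : ¬(false = true))]
      rw [ih acc (temp ++ [x])]
      have htw : (x :: xs).takeWhile (pvCleanB h w) = x :: xs.takeWhile (pvCleanB h w) := by
        rw [List.takeWhile_cons_of_pos hc]
      have hdw : (x :: xs).dropWhile (pvCleanB h w) = xs.dropWhile (pvCleanB h w) := by
        rw [List.dropWhile_cons_of_pos hc]
      cases temp with
      | nil => simp [cleanAltGo, hc]
      | cons t ts => simp [htw, hdw]
    · have hd : pvDirtyA h w x = true := by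
        rw [pvDirtyA_eq_not_clean]; simp [hc]
      rw [hd, if_pos rfl]
      have htw : (x :: xs).takeWhile (pvCleanB h w) = [] := by
        rw [List.takeWhile_cons_of_neg (by simp [hc])]
      have hdw : (x :: xs).dropWhile (pvCleanB h w) = x :: xs := by
        rw [List.dropWhile_cons_of_neg (by simp [hc])]
      have hgo : cleanAltGo h w (x :: xs) = cleanAltGo h w xs := by
        rw [cleanAltGo]; simp [hc]
      cases temp with
      | nil =>
        rw [if_neg (by simp : ¬(([] : List (Int × Int × Int)).length ≠ 0))]
        rw [ih acc []]
        simp [hgo]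
      | cons t ts =>
        rw [if_pos (by simp : ((t :: ts : List (Int × Int × Int)).length ≠ 0))]
        rw [ih (acc ++ [t :: ts]) []]
        simp [htw, hdw, hgo]

-- ===== VERDICT (by name: the statement is the Claim_ definition above) =====
theorem cleanRawData_spec : Claim_equal_cleanRawData := by
  intro raw_data height width _
  unfold Spec_cleanRawData cleanRawData cleanRawData_alt
  rw [PySem.List.foldl_pyRange_zero_pyGetD' raw_data (0, 0, 0)
    (fun s p =>
      if pvDirtyA height width p then
        if s.2.length ≠ 0 then (s.1 ++ [s.2], []) else s
      else (s.1, s.2 ++ [p])) ([], [])]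
  have := pvMain height width raw_data [] []
  simpa [pvFinish] using this
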